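-- pv_equiv track=rewrite | github.com/thaisonngn/pynn | worker/decoder.py | clean_noise
-- ===== SOURCE A (Python) =====
-- def clean_noise(seq, dic, space):
--     clean_seq = []
--     word, has_noise = [], False
--     for el in seq:
--         token = dic[el-2]
--         if token.startswith(space):
--             if not has_noise: clean_seq.extend(word)
--             word = [el]
--             has_noise = (el == 3 or el == 4) # noise or unknown
--         else:
--             word.append(el)
--             if el == 3 or el == 4: has_noise = True
--     if not has_noise: clean_seq.extend(word)
--     return clean_seq
-- ===== SOURCE B (Python) =====
-- def clean_noise(seq, dic, space):
--     # Split seq into word groups (new group at each space-starting token),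
--     # then keep exactly the groups containing no noise token (3 or 4).
--     groups = [[]]
--     for el in seq:
--         if dic[el - 2].startswith(space):
--             groups.append([el])
--         else:
--             groups[-1].append(el)
--     out = []
--     for g in groups:
--         if not any(e == 3 or e == 4 for e in g):
--             out.extend(g)
--     return out
-- ===== Notes on version B (the rewrite author's own statement) =====
-- stated objective: simpler
-- what changed: Replaces A's single loop juggling three pieces of state (result, current word, noise flag) by a two-phase decomposition: first split the sequence into word groups at space-starting tokens, then concatenate the groups that contain no noise token (3 or 4).
import Mathlib
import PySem

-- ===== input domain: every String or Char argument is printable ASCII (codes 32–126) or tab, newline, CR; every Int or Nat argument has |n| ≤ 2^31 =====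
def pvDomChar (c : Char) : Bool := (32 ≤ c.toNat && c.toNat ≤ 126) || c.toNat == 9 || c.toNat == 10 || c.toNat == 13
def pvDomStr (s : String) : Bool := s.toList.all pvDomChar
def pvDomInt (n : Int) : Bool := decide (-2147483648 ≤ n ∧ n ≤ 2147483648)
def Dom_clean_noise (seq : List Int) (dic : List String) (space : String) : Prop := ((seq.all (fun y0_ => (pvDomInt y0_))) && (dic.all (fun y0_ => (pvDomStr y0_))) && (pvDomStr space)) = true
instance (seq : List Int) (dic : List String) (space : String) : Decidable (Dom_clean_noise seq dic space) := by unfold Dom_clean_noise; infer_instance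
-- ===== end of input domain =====

-- ===== PORT A =====
-- B changes only the decomposition (split into word groups, then filter), not the cost.
def pvStepA (dic : List String) (space : String)
    (st : List Int × List Int × Bool) (el : Int) : List Int × List Int × Bool :=
  let token := PySem.List.pyGetD dic (el - 2) ""
  if PySem.Str.startswith token space then
    ((if st.2.2 then st.1 else st.1 ++ st.2.1), [el], (el == 3 || el == 4))
  else
    (st.1, st.2.1 ++ [el], (st.2.2 || (el == 3 || el == 4)))

def clean_noise (seq : List Int) (dic : List String) (space : String) : List Int :=
  let st := seq.foldl (pvStepA dic space) ([], [], false)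
  if st.2.2 then st.1 else st.1 ++ st.2.1

-- ===== PORT B =====
def pvStepB (dic : List String) (space : String)
    (st : List (List Int) × List Int) (el : Int) : List (List Int) × List Int :=
  if PySem.Str.startswith (PySem.List.pyGetD dic (el - 2) "") space then
    (st.1 ++ [st.2], [el])
  else
    (st.1, st.2 ++ [el])

def pvOkGroup (g : List Int) : Bool := !(g.any (fun e => e == 3 || e == 4))

def clean_noise_alt (seq : List Int) (dic : List String) (space : String) : List Int :=
  let st := seq.foldl (pvStepB dic space) ([], [])
  let groups := st.1 ++ [st.2]
  (groups.filter pvOkGroup).flatten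

-- ===== PRECONDITION & SPEC =====
-- Pre_ excludes exactly the inputs on which Python A raises IndexError at dic[el-2].
def Pre_clean_noise (seq : List Int) (dic : List String) (space : String) : Prop :=
  (seq.all (fun el => decide (-(dic.length : Int) ≤ el - 2) && decide (el - 2 < (dic.length : Int)))) = true
instance (seq : List Int) (dic : List String) (space : String) : Decidable (Pre_clean_noise seq dic space) := by unfold Pre_clean_noise; infer_instance
def pvWitness_clean_noise : List Int × List String × String := ([2, 5, 3, 2, 4], [" a", "b", " c", " d"], " ")

def Spec_clean_noise (seq : List Int) (dic : List String) (space : String) (out : List Int) : Prop := out = clean_noise_alt seq dic space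
instance (seq : List Int) (dic : List String) (space : String) (out : List Int) : Decidable (Spec_clean_noise seq dic space out) := by unfold Spec_clean_noise; infer_instance

-- ===== CLAIM (what is proved, stated in full; the proofs are below) =====
def Claim_equal_clean_noise : Prop := ∀ (seq : List Int) (dic : List String) (space : String), Dom_clean_noise seq dic space → Pre_clean_noise seq dic space → Spec_clean_noise seq dic space (clean_noise seq dic space)

-- ===== LEMMAS AND PROOFS =====
theorem pv_ok_split (cs : List Int) (gs : List (List Int)) (cur : List Int)
    (hcs : cs = (gs.filter pvOkGroup).flatten) :
    (if (cur.any (fun e => e == 3 || e == 4)) then cs else cs ++ cur)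
      = ((gs ++ [cur]).filter pvOkGroup).flatten := by
  subst hcs
  rcases h : cur.any (fun e => e == 3 || e == 4) with _ | _ <;>
    simp [List.filter_append, pvOkGroup, h]

theorem pv_loop_rel (dic : List String) (space : String) (seq : List Int) :
    ∀ (gs : List (List Int)) (cur : List Int),
    (let st := seq.foldl (pvStepA dic space)
        ((gs.filter pvOkGroup).flatten, cur, cur.any (fun e => e == 3 || e == 4))
     if st.2.2 then st.1 else st.1 ++ st.2.1)
    =
    (let st := seq.foldl (pvStepB dic space) (gs, cur)
     ((st.1 ++ [st.2]).filter pvOkGroup).flatten) := by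
  induction seq with
  | nil =>
      intro gs cur
      simpa using pv_ok_split _ gs cur rfl
  | cons el rest ih =>
      intro gs cur
      simp only [List.foldl_cons]
      by_cases hb : PySem.Chars.startswith (PySem.List.pyGetD dic (el - 2) "").toList space.toList = true
      · have hA : pvStepA dic space ((gs.filter pvOkGroup).flatten, cur,
            cur.any (fun e => e == 3 || e == 4)) el
            = (((gs ++ [cur]).filter pvOkGroup).flatten, [el],
               [el].any (fun e => e == 3 || e == 4)) := by
          simp only [pvStepA, PySem.Str.startswith_eq, hb, if_true, List.any_cons, List.any_nil, Bool.or_false]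
          exact congrArg (fun x => (x, [el], (el == 3 || el == 4))) (pv_ok_split _ gs cur rfl)
        have hB : pvStepB dic space (gs, cur) el = (gs ++ [cur], [el]) := by
          simp [pvStepB, hb]
        rw [hA, hB]
        exact ih (gs ++ [cur]) [el]
      · have hA : pvStepA dic space ((gs.filter pvOkGroup).flatten, cur,
            cur.any (fun e => e == 3 || e == 4)) el
            = ((gs.filter pvOkGroup).flatten, cur ++ [el],
               (cur ++ [el]).any (fun e => e == 3 || e == 4)) := by
          simp [pvStepA, hb, List.any_append]
        have hB : pvStepB dic space (gs, cur) el = (gs, cur ++ [el]) := by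
          simp [pvStepB, hb]
        rw [hA, hB]
        exact ih gs (cur ++ [el])

-- ===== VERDICT (by name: the statement is the Claim_ definition above) =====
theorem clean_noise_spec : Claim_equal_clean_noise := by
  intro seq dic space _ _
  unfold Spec_clean_noise clean_noise clean_noise_alt
  simpa using pv_loop_rel dic space seq [] []
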